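-- pv_equiv track=rewrite | github.com/kluzior/my_master_thesis | contour_test/main_multilevel_class.py | sort_child_index
-- ===== SOURCE A (Python) =====
-- def sort_child_index(hierarchy):
--     child_dict = {}
--     for idx, h in enumerate(hierarchy):
--         parent = h[-1]
--         if parent == -1:
--             continue
--         if parent not in child_dict:
--             child_dict[parent] = []
--         child_dict[parent].append(idx)
--     return child_dict
-- ===== SOURCE B (Python) =====
-- def sort_child_index(hierarchy):
--     parents = []
--     for h in hierarchy:
--         p = h[-1]
--         if p != -1 and p not in parents:
--             parents.append(p)
--     return {p: [i for i, h in enumerate(hierarchy) if h[-1] == p] for p in parents}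
-- ===== Notes on version B (the rewrite author's own statement) =====
-- stated objective: alternative
-- what changed: A builds the grouping in one pass over enumerate(hierarchy), accumulating index lists in a dict; B first collects the distinct parents in first-appearance order and then builds each parent's index list by a separate per-parent scan (a dict comprehension), so no dict is mutated during the traversal.
import Mathlib
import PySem

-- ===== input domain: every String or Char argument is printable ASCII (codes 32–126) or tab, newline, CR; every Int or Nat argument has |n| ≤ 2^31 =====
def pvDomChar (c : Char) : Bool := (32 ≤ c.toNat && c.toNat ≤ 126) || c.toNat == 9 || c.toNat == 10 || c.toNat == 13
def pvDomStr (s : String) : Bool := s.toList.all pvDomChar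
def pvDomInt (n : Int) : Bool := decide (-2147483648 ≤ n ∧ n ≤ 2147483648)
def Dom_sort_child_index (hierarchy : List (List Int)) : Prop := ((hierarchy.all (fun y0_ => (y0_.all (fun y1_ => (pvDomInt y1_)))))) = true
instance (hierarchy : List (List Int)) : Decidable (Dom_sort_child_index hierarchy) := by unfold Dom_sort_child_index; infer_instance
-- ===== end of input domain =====

-- B replaces A's single-pass dict accumulation by a two-pass scheme (collect the
-- distinct parents in first-appearance order, then gather each parent's child indices
-- by a per-parent scan); objective: alternative decomposition, same return value.

-- ===== PORT A =====
def sort_child_index (hierarchy : List (List Int)) : List (Int × List Int) :=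
  ((PySem.List.enumerate hierarchy).foldl
    (fun (d : PySem.Dict Int (List Int)) q =>
      match PySem.List.pyGet? q.2 (-1) with
      | none => d          -- h[-1] raises IndexError in Python; excluded by Pre_
      | some parent =>
        if parent = -1 then d
        else
          let d' := if d.contains parent then d else d.insert parent []
          d'.modify parent [] (fun l => l ++ [q.1]))
    PySem.Dict.empty).items

-- ===== PORT B =====
def sort_child_index_alt (hierarchy : List (List Int)) : List (Int × List Int) :=
  let parents := hierarchy.foldl
    (fun (ps : List Int) h =>
      match PySem.List.pyGet? h (-1) with
      | none => ps         -- h[-1] raises IndexError in Python; excluded by Pre_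
      | some p => if p ≠ -1 ∧ p ∉ ps then ps ++ [p] else ps) []
  parents.map (fun p =>
    (p, (PySem.List.enumerate hierarchy).filterMap
          (fun q => if PySem.List.pyGet? q.2 (-1) = some p then some q.1 else none)))

-- ===== PRECONDITION & SPEC =====
-- Pre_ excludes exactly the inputs on which Python A raises IndexError: an empty inner list (h[-1]).
def Pre_sort_child_index (hierarchy : List (List Int)) : Prop :=
  ∀ h ∈ hierarchy, h ≠ []
instance (hierarchy : List (List Int)) : Decidable (Pre_sort_child_index hierarchy) := by unfold Pre_sort_child_index; infer_instance

def pvWitness_sort_child_index : List (List Int) := [[0, 1], [2, -1], [3, 1], [4, 0]]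

def Spec_sort_child_index (hierarchy : List (List Int)) (out : List (Int × List Int)) : Prop := out = sort_child_index_alt hierarchy
instance (hierarchy : List (List Int)) (out : List (Int × List Int)) : Decidable (Spec_sort_child_index hierarchy out) := by unfold Spec_sort_child_index; infer_instance

-- ===== CLAIM (what is proved, stated in full; the proofs are below) =====
def Claim_equal_sort_child_index : Prop := ∀ (hierarchy : List (List Int)), Dom_sort_child_index hierarchy → Pre_sort_child_index hierarchy → Spec_sort_child_index hierarchy (sort_child_index hierarchy)

-- ===== LEMMAS AND PROOFS =====

-- the (parent, idx) extractor shared by the analysis of both folds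
def pvKey (q : Int × List Int) : Option (Int × Int) :=
  match PySem.List.pyGet? q.2 (-1) with
  | none => none
  | some p => if p = -1 then none else some (p, q.1)

def pvPar (h : List Int) : Option Int :=
  match PySem.List.pyGet? h (-1) with
  | none => none
  | some p => if p = -1 then none else some p

theorem pvKey_eq (s : Int) (h : List Int) :
    pvKey (s, h) = (pvPar h).map (fun p => (p, s)) := by
  unfold pvKey pvPar
  cases PySem.List.pyGet? h (-1) with
  | none => rfl
  | some p =>
    by_cases hp : p = -1
    · simp [hp]
    · simp [hp]

theorem pvPar_some {h : List Int} {p : Int} (hq : pvPar h = some p) :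
    PySem.List.pyGet? h (-1) = some p ∧ p ≠ -1 := by
  unfold pvPar at hq
  split at hq
  · simp at hq
  · next r hg =>
    split at hq
    · simp at hq
    · next hr => cases hq; exact ⟨hg, hr⟩

theorem pvPar_none {h : List Int} (hq : pvPar h = none) {p : Int} (hp : p ≠ -1) :
    PySem.List.pyGet? h (-1) ≠ some p := by
  unfold pvPar at hq
  split at hq
  · next hg => rw [hg]; simp
  · next r hg =>
    split at hq
    · next hr => rw [hg]; intro hc; cases hc; exact hp hr
    · simp at hq

theorem pv_step_eq (d : PySem.Dict Int (List Int)) (k : Int) (f : List Int → List Int) :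
    (if d.contains k then d else d.insert k []).modify k [] f = d.modify k [] f := by
  by_cases h : d.contains k = true
  · simp [h]
  · simp only [Bool.not_eq_true] at h
    rw [if_neg (by simp [h])]
    simp [PySem.Dict.modify, PySem.Dict.getD_insert_self,
      PySem.Dict.insert_insert_self, PySem.Dict.getD_of_not_contains (h := h)]

theorem pv_fst_pairs (l : List (List Int)) (s : Int) :
    ((PySem.List.enumerate l s).filterMap pvKey).map (·.1) = l.filterMap pvPar := by
  induction l generalizing s with
  | nil => rfl
  | cons h t ih =>
    rw [PySem.List.enumerate_cons, List.filterMap_cons, List.filterMap_cons, pvKey_eq]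
    cases hq : pvPar h with
    | none => simpa using ih (s + 1)
    | some p => simpa using ih (s + 1)

theorem pv_group_eq (qs : List (Int × List Int)) (p : Int) (hp : p ≠ -1) :
    ((qs.filterMap pvKey).filter (fun x => x.1 == p)).map (·.2)
      = qs.filterMap (fun q => if PySem.List.pyGet? q.2 (-1) = some p then some q.1 else none) := by
  induction qs with
  | nil => rfl
  | cons q t ih =>
    obtain ⟨i, hrow⟩ := q
    rw [List.filterMap_cons, List.filterMap_cons, pvKey_eq]
    cases hq : pvPar hrow with
    | none =>
      have hne : PySem.List.pyGet? (i, hrow).2 (-1) ≠ some p := pvPar_none hq hp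
      simp only [Option.map_none, if_neg hne]
      exact ih
    | some r =>
      obtain ⟨hg, hr⟩ := pvPar_some hq
      by_cases hrp : r = p
      · subst hrp
        simp [hg, ih]
      · have h1 : PySem.List.pyGet? (i, hrow).2 (-1) ≠ some p := by
          simp only [hg]; intro hc; cases hc; exact hrp rfl
        simp only [Option.map_some, List.filter_cons, if_neg h1]
        have hb : ((r, i).1 == p) = false := by simp [hrp]
        simp only [hb, Bool.false_eq_true, if_false]
        exact ih

theorem pv_foldl_filterMap {α β γ : Type} (g : α → Option β) (step : γ → β → γ)
    (l : List α) (init : γ) :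
    l.foldl (fun d q => match g q with | none => d | some x => step d x) init
      = (l.filterMap g).foldl step init := by
  induction l generalizing init with
  | nil => rfl
  | cons a l ih =>
    cases hg : g a <;> simp [List.foldl_cons, hg, ih]

theorem pv_A_body_eq (hierarchy : List (List Int)) :
    sort_child_index hierarchy
      = (((PySem.List.enumerate hierarchy).filterMap pvKey).foldl
          (fun (d : PySem.Dict Int (List Int)) x => d.modify x.1 [] (fun l => l ++ [x.2]))
          PySem.Dict.empty).items := by
  unfold sort_child_index
  rw [← pv_foldl_filterMap pvKey
        (fun (d : PySem.Dict Int (List Int)) x => d.modify x.1 [] (fun l => l ++ [x.2]))]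
  congr 2
  funext d q
  unfold pvKey
  cases hg : PySem.List.pyGet? q.2 (-1) with
  | none => rfl
  | some p =>
    by_cases hp : p = -1
    · simp [hp]
    · simp only [hp, if_false]
      exact pv_step_eq d p _

theorem pv_parents_eq (hierarchy : List (List Int)) :
    hierarchy.foldl
      (fun (ps : List Int) h =>
        match PySem.List.pyGet? h (-1) with
        | none => ps
        | some p => if p ≠ -1 ∧ p ∉ ps then ps ++ [p] else ps) []
      = PySem.Set.ofList (hierarchy.filterMap pvPar) := by
  rw [PySem.Set.ofList_eq_foldl, ← pv_foldl_filterMap pvPar PySem.Set.add]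
  congr 1
  funext ps h
  unfold pvPar
  cases hg : PySem.List.pyGet? h (-1) with
  | none => rfl
  | some p =>
    by_cases hp : p = -1
    · simp [hp]
    · by_cases hm : p ∈ ps
      · simp [hp, hm]
      · simp [hp, hm]

theorem pv_mem_parents_ne (hierarchy : List (List Int)) (p : Int)
    (hmem : p ∈ PySem.Set.ofList (hierarchy.filterMap pvPar)) : p ≠ -1 := by
  rw [PySem.Set.mem_ofList, List.mem_filterMap] at hmem
  obtain ⟨h, _, hEq⟩ := hmem
  exact (pvPar_some hEq).2

-- ===== VERDICT (by name: the statement is the Claim_ definition above) =====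
theorem sort_child_index_spec : Claim_equal_sort_child_index := by
  intro hierarchy _ _
  unfold Spec_sort_child_index sort_child_index_alt
  rw [pv_A_body_eq, pv_parents_eq]
  set pairs := (PySem.List.enumerate hierarchy).filterMap pvKey with hpairs
  have hnodup : ((pairs.foldl
      (fun (d : PySem.Dict Int (List Int)) x => d.modify x.1 [] (fun l => l ++ [x.2]))
      PySem.Dict.empty)).keys.Nodup :=
    PySem.Dict.nodup_keys_foldl_modify_key pairs Prod.fst [] _ _ PySem.Dict.nodup_keys_empty
  rw [PySem.Dict.items_eq_map_keys _ hnodup []]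
  rw [PySem.Dict.keys_foldl_modify_key]
  simp only [PySem.Dict.keys_empty]
  rw [PySem.Set.update_nil_left, hpairs, pv_fst_pairs]
  apply List.map_congr_left
  intro p hp
  have hne : p ≠ -1 := pv_mem_parents_ne hierarchy p hp
  congr 1
  rw [PySem.Dict.getD_foldl_modify_append]
  simp only [PySem.Dict.getD_empty, List.nil_append]
  exact pv_group_eq _ p hne
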